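-- pv_equiv track=rewrite | github.com/Ddbox123/self-evo-agent | core/evolution/code_generator.py | generate_import_section
-- ===== SOURCE A (Python) =====
-- from typing import Dict, List, Optional, Any, Tuple
--
-- def generate_import_section(
--
--     imports: List[str],
--     standard_library: List[str] = None,
--     third_party: List[str] = None,
--     local: List[str] = None,
-- ) -> str:
--     """
--     生成标准化的导入部分
--
--     Args:
--         imports: 所有导入列表
--         standard_library: 标准库
--         third_party: 第三方库
--         local: 本地导入
--
--     Returns:
--         格式化的导入代码
--     """
--     sections = []
--
--     # 标准库
--     if standard_library:
--         sections.append('\n'.join(f"import {i}" for i in sorted(standard_library)))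
--
--     # 第三方库
--     if third_party:
--         if sections:
--             sections.append('')
--         sections.append('\n'.join(f"import {i}" for i in sorted(third_party)))
--
--     # 本地导入
--     if local:
--         if sections:
--             sections.append('')
--         sections.append('\n'.join(f"from {i} import ..." for i in sorted(local)))
--
--     return '\n'.join(sections)
-- ===== SOURCE B (Python) =====
-- def generate_import_section(
--     imports,
--     standard_library=None,
--     third_party=None,
--     local=None,
-- ):
--     merged = (
--         [(0, i) for i in (standard_library or [])]
--         + [(1, i) for i in (third_party or [])]
--         + [(2, i) for i in (local or [])]
--     )
--     pieces = []
--     prev = None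
--     for rank, name in sorted(merged):
--         if pieces:
--             pieces.append("\n" if rank == prev else "\n\n")
--         pieces.append(("import " + name) if rank < 2 else ("from " + name + " import ..."))
--         prev = rank
--     return "".join(pieces)
-- ===== Notes on version B (the rewrite author's own statement) =====
-- stated objective: alternative
-- what changed: Instead of sorting each of the three groups separately and joining blocks with '' separator bookkeeping, B tags every name with a group rank, performs a single global sort of the (rank, name) pairs, and emits the result in one streaming pass that inserts a blank line exactly where the rank changes.
import Mathlib
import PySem

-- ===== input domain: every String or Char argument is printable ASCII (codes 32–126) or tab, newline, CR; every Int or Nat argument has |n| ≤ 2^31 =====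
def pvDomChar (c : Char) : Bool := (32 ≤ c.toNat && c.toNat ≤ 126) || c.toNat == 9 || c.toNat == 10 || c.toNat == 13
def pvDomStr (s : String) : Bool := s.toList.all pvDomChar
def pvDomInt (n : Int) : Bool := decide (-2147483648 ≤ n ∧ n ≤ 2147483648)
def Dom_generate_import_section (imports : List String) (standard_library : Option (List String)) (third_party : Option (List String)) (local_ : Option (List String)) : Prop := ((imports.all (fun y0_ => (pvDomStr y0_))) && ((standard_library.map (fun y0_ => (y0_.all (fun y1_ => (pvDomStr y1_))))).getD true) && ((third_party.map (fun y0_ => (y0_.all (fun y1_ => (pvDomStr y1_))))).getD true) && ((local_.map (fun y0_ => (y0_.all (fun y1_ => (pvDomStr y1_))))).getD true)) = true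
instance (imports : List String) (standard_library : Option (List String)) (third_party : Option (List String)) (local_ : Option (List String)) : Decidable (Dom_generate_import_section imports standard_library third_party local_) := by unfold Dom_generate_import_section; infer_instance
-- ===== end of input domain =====

-- B replaces A's three per-group sort-and-join blocks (with '' separator bookkeeping) by one
-- global sort of (group-rank, name) pairs and a single streaming emission pass driven by rank
-- changes; a genuinely different algorithm of the same cost ('alternative').

-- ===== PORT A =====
-- sections.append('\n'.join(f"import {i}" for i in sorted(xs)))  (resp. the 'from … import ...' template)
def pvBlockA (tmpl : String → String) (xs : List String) : String :=
  PySem.Str.join "\n" ((PySem.List.sorted xs (fun x => x) false).map tmpl)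

def generate_import_section (imports : List String) (standard_library : Option (List String)) (third_party : Option (List String)) (local_ : Option (List String)) : String :=
  let sections : List String := []
  -- if standard_library:
  let sections := if (standard_library.getD []).isEmpty then sections else
    sections ++ [pvBlockA (fun i => "import " ++ i) (standard_library.getD [])]
  -- if third_party:  (with 'if sections: sections.append('')')
  let sections := if (third_party.getD []).isEmpty then sections else
    (if sections.isEmpty then sections else sections ++ [""]) ++
      [pvBlockA (fun i => "import " ++ i) (third_party.getD [])]
  -- if local:
  let sections := if (local_.getD []).isEmpty then sections else
    (if sections.isEmpty then sections else sections ++ [""]) ++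
      [pvBlockA (fun i => "from " ++ i ++ " import ...") (local_.getD [])]
  PySem.Str.join "\n" sections

-- ===== PORT B =====
-- ("import " + name) if rank < 2 else ("from " + name + " import ...")
def pvLineB (rank : Int) (name : String) : String :=
  if rank < 2 then "import " ++ name else "from " ++ name ++ " import ..."

-- one iteration of  'for rank, name in sorted(merged): …'  over the state (pieces, prev)
def pvEmitB (st : List String × Option Int) (p : Int × String) : List String × Option Int :=
  let pieces := if st.1.isEmpty then st.1 else
    st.1 ++ [if some p.1 == st.2 then "\n" else "\n\n"]
  (pieces ++ [pvLineB p.1 p.2], some p.1)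

def generate_import_section_alt (imports : List String) (standard_library : Option (List String)) (third_party : Option (List String)) (local_ : Option (List String)) : String :=
  let merged : List (Int × String) :=
    (standard_library.getD []).map (fun i => ((0 : Int), i))
      ++ (third_party.getD []).map (fun i => ((1 : Int), i))
      ++ (local_.getD []).map (fun i => ((2 : Int), i))
  let st := (PySem.List.sorted2 merged (fun p => p.1) (fun p => p.2) false).foldl pvEmitB ([], none)
  PySem.Str.join "" st.1

-- ===== PRECONDITION & SPEC =====
def Spec_generate_import_section (imports : List String) (standard_library : Option (List String)) (third_party : Option (List String)) (local_ : Option (List String)) (out : String) : Prop := out = generate_import_section_alt imports standard_library third_party local_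
instance (imports : List String) (standard_library : Option (List String)) (third_party : Option (List String)) (local_ : Option (List String)) (out : String) : Decidable (Spec_generate_import_section imports standard_library third_party local_ out) := by unfold Spec_generate_import_section; infer_instance

-- ===== CLAIM (what is proved, stated in full; the proofs are below) =====
def Claim_equal_generate_import_section : Prop := ∀ (imports : List String) (standard_library : Option (List String)) (third_party : Option (List String)) (local_ : Option (List String)), Dom_generate_import_section imports standard_library third_party local_ → Spec_generate_import_section imports standard_library third_party local_ (generate_import_section imports standard_library third_party local_)

-- ===== LEMMAS AND PROOFS =====
def pvLexLe (a b : Int × String) : Prop := a.1 < b.1 ∨ (a.1 = b.1 ∧ a.2 ≤ b.2)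
def pvBefore (a b : Int × String) : Bool :=
  decide (a.1 < b.1) || (!decide (b.1 < a.1) && decide (a.2 < b.2))

theorem pvLexLe_trans {a b c : Int × String} (h1 : pvLexLe a b) (h2 : pvLexLe b c) : pvLexLe a c := by
  unfold pvLexLe at *
  rcases h1 with h | ⟨e1, s1⟩ <;> rcases h2 with h' | ⟨e2, s2⟩
  · exact Or.inl (h.trans h')
  · exact Or.inl (e2 ▸ h)
  · exact Or.inl (e1 ▸ h')
  · exact Or.inr ⟨e1.trans e2, s1.trans s2⟩

theorem pvLexLe_antisymm {a b : Int × String} (h1 : pvLexLe a b) (h2 : pvLexLe b a) : a = b := by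
  unfold pvLexLe at *
  rcases h1 with h | ⟨e1, s1⟩ <;> rcases h2 with h' | ⟨e2, s2⟩ <;>
    first
      | (exfalso; omega)
      | (exact Prod.ext e1 (le_antisymm s1 s2))

theorem pvBefore_true (a b : Int × String) (h : pvBefore a b = true) : pvLexLe a b := by
  unfold pvBefore at h; unfold pvLexLe
  rw [Bool.or_eq_true, Bool.and_eq_true, Bool.not_eq_true', decide_eq_true_iff,
    decide_eq_false_iff_not, decide_eq_true_iff] at h
  rcases h with h1 | ⟨h2, h3⟩
  · exact Or.inl h1
  · by_cases h1 : a.1 < b.1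
    · exact Or.inl h1
    · exact Or.inr ⟨by omega, le_of_lt h3⟩

theorem pvBefore_false (a b : Int × String) (h : pvBefore a b = false) : pvLexLe b a := by
  unfold pvBefore at h; unfold pvLexLe
  rw [Bool.or_eq_false_iff, Bool.and_eq_false_iff, decide_eq_false_iff_not] at h
  obtain ⟨h1, h2⟩ := h
  by_cases hb : b.1 < a.1
  · exact Or.inl hb
  · refine Or.inr ⟨by omega, ?_⟩
    rcases h2 with h2 | h2
    · rw [Bool.not_eq_false', decide_eq_true_iff] at h2; omega
    · rw [decide_eq_false_iff_not] at h2; exact le_of_not_gt h2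

theorem pvInsert_pw (x : Int × String) (ys : List (Int × String))
    (h : ys.Pairwise pvLexLe) : (PySem.List.insertBy pvBefore x ys).Pairwise pvLexLe := by
  induction ys with
  | nil => simp [PySem.List.insertBy]
  | cons y ys ih =>
    rw [List.pairwise_cons] at h
    obtain ⟨hy, hys⟩ := h
    by_cases hb : pvBefore x y = true
    · rw [PySem.List.insertBy, if_pos hb]
      have hxy := pvBefore_true x y hb
      refine List.Pairwise.cons ?_ (List.Pairwise.cons hy hys)
      intro z hz
      rcases hz with _ | hz
      · exact hxy
      · exact pvLexLe_trans hxy (hy z (by assumption))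
    · rw [PySem.List.insertBy, if_neg hb]
      have hyx := pvBefore_false x y (by simpa using hb)
      refine List.Pairwise.cons ?_ (ih hys)
      intro z hz
      rw [PySem.List.mem_insertBy] at hz
      rcases hz with rfl | hz
      · exact hyx
      · exact hy z hz

theorem pvFoldl_insert_pw (xs : List (Int × String)) (acc : List (Int × String))
    (h : acc.Pairwise pvLexLe) :
    (xs.foldl (fun acc x => PySem.List.insertBy pvBefore x acc) acc).Pairwise pvLexLe := by
  induction xs generalizing acc with
  | nil => simpa
  | cons x xs ih => exact ih _ (pvInsert_pw x acc h)

theorem pvSorted2_pw (xs : List (Int × String)) :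
    (PySem.List.sorted2 xs (fun p => p.1) (fun p => p.2) false).Pairwise pvLexLe := by
  have : PySem.List.sorted2 xs (fun p => p.1) (fun p => p.2) false
      = xs.foldl (fun acc x => PySem.List.insertBy pvBefore x acc) [] := by
    rfl
  rw [this]
  exact pvFoldl_insert_pw xs [] (by simp)

theorem pvSorted2_eq (xs target : List (Int × String)) (hperm : target.Perm xs)
    (hpw : target.Pairwise pvLexLe) :
    PySem.List.sorted2 xs (fun p => p.1) (fun p => p.2) false = target := by
  refine List.eq_of_perm_of_sorted (fun a b _ _ h1 h2 => pvLexLe_antisymm h1 h2)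
    (pvSorted2_pw xs) hpw ((PySem.List.sorted2_perm xs _ _ _).trans hperm.symm)

-- ---- emission lemmas ----
theorem pvEmit_rest (t : List String) (r : Int) (out : List String) (h : out ≠ []) :
    (t.map (fun n => (r, n))).foldl pvEmitB (out, some r)
      = (out ++ t.flatMap (fun n => ["\n", pvLineB r n]), some r) := by
  induction t generalizing out with
  | nil => simp
  | cons n t ih =>
    simp only [List.map_cons, List.foldl_cons]
    have hstep : pvEmitB (out, some r) (r, n) = (out ++ ["\n", pvLineB r n], some r) := by
      simp [pvEmitB, h]
    rw [hstep, ih (out ++ ["\n", pvLineB r n]) (by simp)]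
    simp

theorem pvEmit_block_nil (l : List String) (r : Int) (prev : Option Int) (n : String) :
    ((n :: l).map (fun m => (r, m))).foldl pvEmitB ([], prev)
      = (pvLineB r n :: l.flatMap (fun m => ["\n", pvLineB r m]), some r) := by
  simp only [List.map_cons, List.foldl_cons]
  have hstep : pvEmitB ([], prev) (r, n) = ([pvLineB r n], some r) := by simp [pvEmitB]
  rw [hstep, pvEmit_rest l r _ (by simp)]
  simp

theorem pvEmit_block_ne (l : List String) (r : Int) (out : List String) (prev : Option Int)
    (hout : out ≠ []) (hprev : (some r == prev) = false) (n : String) :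
    ((n :: l).map (fun m => (r, m))).foldl pvEmitB (out, prev)
      = (out ++ "\n\n" :: pvLineB r n :: l.flatMap (fun m => ["\n", pvLineB r m]), some r) := by
  simp only [List.map_cons, List.foldl_cons]
  have hstep : pvEmitB (out, prev) (r, n) = (out ++ ["\n\n", pvLineB r n], some r) := by
    simp [pvEmitB, hout, hprev]
  rw [hstep, pvEmit_rest l r _ (by simp)]
  simp

-- ---- join lemmas (Chars level) ----
theorem cjoin_nil_sep (parts : List (List Char)) : PySem.Chars.join [] parts = parts.flatten := by
  simp [PySem.Chars.join, List.intercalate]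
  induction parts with
  | nil => simp
  | cons a t ih => cases t <;> simp_all [List.intersperse]


theorem cjoin_flat' (g : String → List Char) (x : List Char) (t : List String) :
    PySem.Chars.join ['\n'] (x :: t.map g) = x ++ t.flatMap (fun m => '\n' :: g m) := by
  induction t generalizing x with
  | nil => simp [PySem.Chars.join_singleton]
  | cons m t ih =>
    simp only [List.map_cons]
    rw [PySem.Chars.join_cons_cons, ih (g m)]
    simp

theorem cjoin_flat (f : String → String) (n : String) (t : List String) :
    PySem.Chars.join ['\n'] (((n :: t).map f).map String.toList)
      = (f n).toList ++ t.flatMap (fun m => '\n' :: (f m).toList) := by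
  induction t generalizing n with
  | nil => simp [PySem.Chars.join_singleton]
  | cons m t ih =>
    simp only [List.map_cons] at *
    rw [PySem.Chars.join_cons_cons, ih m]
    simp

theorem cflatMap (f : String → String) (t : List String) :
    ((t.flatMap (fun m => ["\n", f m])).map String.toList).flatten
      = t.flatMap (fun m => '\n' :: (f m).toList) := by
  induction t with
  | nil => simp
  | cons m t ih => simp [ih]

theorem cjoin_flat_imp (n : String) (t : List String) :
    PySem.Chars.join ['\n'] (("import " ++ n).toList
        :: (t.map (fun i => "import " ++ i)).map String.toList)
      = ("import " ++ n).toList ++ t.flatMap (fun m => '\n' :: ("import " ++ m).toList) := by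
  simpa using cjoin_flat (fun i => "import " ++ i) n t

theorem cjoin_flat_from (n : String) (t : List String) :
    PySem.Chars.join ['\n'] (("from " ++ n ++ " import ...").toList
        :: (t.map (fun i => "from " ++ i ++ " import ...")).map String.toList)
      = ("from " ++ n ++ " import ...").toList
        ++ t.flatMap (fun m => '\n' :: ("from " ++ m ++ " import ...").toList) := by
  simpa using cjoin_flat (fun i => "from " ++ i ++ " import ...") n t

theorem cflatMap_imp (t : List String) :
    ((t.flatMap (fun m => ["\n", "import " ++ m])).map String.toList).flatten
      = t.flatMap (fun m => '\n' :: ("import " ++ m).toList) :=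
  cflatMap (fun i => "import " ++ i) t

theorem cflatMap_from (t : List String) :
    ((t.flatMap (fun m => ["\n", "from " ++ m ++ " import ..."])).map String.toList).flatten
      = t.flatMap (fun m => '\n' :: ("from " ++ m ++ " import ...").toList) :=
  cflatMap (fun i => "from " ++ i ++ " import ...") t

theorem toList_empty_str : "".toList = ([] : List Char) := rfl
theorem toList_nl : "\n".toList = ['\n'] := rfl
theorem toList_nlnl : "\n\n".toList = ['\n', '\n'] := rfl

theorem pvLineB_0 (n : String) : pvLineB 0 n = "import " ++ n := by norm_num [pvLineB]
theorem pvLineB_1 (n : String) : pvLineB 1 n = "import " ++ n := by norm_num [pvLineB]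
theorem pvLineB_2 (n : String) : pvLineB 2 n = "from " ++ n ++ " import ..." := by norm_num [pvLineB]

theorem pvBlock_pw (r : Int) (g : List String) :
    ((PySem.List.sorted g (fun x => x) false).map (fun i => (r, i))).Pairwise pvLexLe := by
  exact List.Pairwise.map _ (fun a b hab => Or.inr ⟨rfl, hab⟩)
    (PySem.List.sorted_pairwise g (fun x => x))

theorem pvSortedMerged (g0 g1 g2 : List String) :
    PySem.List.sorted2
      (g0.map (fun i => ((0 : Int), i)) ++ g1.map (fun i => ((1 : Int), i))
        ++ g2.map (fun i => ((2 : Int), i)))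
      (fun p => p.1) (fun p => p.2) false
    = (PySem.List.sorted g0 (fun x => x) false).map (fun i => ((0 : Int), i))
      ++ (PySem.List.sorted g1 (fun x => x) false).map (fun i => ((1 : Int), i))
      ++ (PySem.List.sorted g2 (fun x => x) false).map (fun i => ((2 : Int), i)) := by
  apply pvSorted2_eq
  · exact List.Perm.append
      (List.Perm.append ((PySem.List.sorted_perm g0 (fun x => x) false).map _)
        ((PySem.List.sorted_perm g1 (fun x => x) false).map _))
      ((PySem.List.sorted_perm g2 (fun x => x) false).map _)
  · rw [List.pairwise_append]
    refine ⟨?_, pvBlock_pw 2 g2, ?_⟩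
    · rw [List.pairwise_append]
      refine ⟨pvBlock_pw 0 g0, pvBlock_pw 1 g1, ?_⟩
      intro a ha b hb
      simp only [List.mem_map] at ha hb
      obtain ⟨x, _, rfl⟩ := ha; obtain ⟨y, _, rfl⟩ := hb
      exact Or.inl (by norm_num)
    · intro a ha b hb
      simp only [List.mem_map] at hb
      obtain ⟨y, _, rfl⟩ := hb
      rcases List.mem_append.1 ha with ha | ha <;>
        · simp only [List.mem_map] at ha
          obtain ⟨x, _, rfl⟩ := ha
          exact Or.inl (by norm_num)

theorem sorted_nil_str : PySem.List.sorted ([] : List String) (fun x => x) false = [] := by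
  rw [PySem.List.sorted_eq_nil_iff]

theorem sorted_cons_of_not_isEmpty {g : List String} (h : ¬ g.isEmpty = true) :
    ∃ m tl, PySem.List.sorted g (fun x => x) false = m :: tl :=
  List.exists_cons_of_ne_nil (fun hnil => (by simpa using h : g ≠ []) ((PySem.List.sorted_eq_nil_iff _ _ _).mp hnil))

theorem main_eq (imports : List String) (standard_library : Option (List String)) (third_party : Option (List String)) (local_ : Option (List String)) :
    generate_import_section imports standard_library third_party local_
      = generate_import_section_alt imports standard_library third_party local_ := by
  simp only [generate_import_section, generate_import_section_alt]
  rw [pvSortedMerged]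
  by_cases h0 : (standard_library.getD []).isEmpty <;>
    by_cases h1 : (third_party.getD []).isEmpty <;>
      by_cases h2 : (local_.getD []).isEmpty
  -- T T T: nothing to emit
  · rw [List.isEmpty_iff] at h0 h1 h2
    simp [h0, h1, h2, sorted_nil_str, PySem.Str.join]
  -- T T F: only local
  · rw [List.isEmpty_iff] at h0 h1
    obtain ⟨m2, t2, hS2⟩ := sorted_cons_of_not_isEmpty h2
    simp only [h0, h1, sorted_nil_str, List.map_nil, List.nil_append, List.isEmpty_nil, if_true]
    rw [hS2, pvEmit_block_nil t2 2 none m2]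
    rw [← String.toList_inj]
    simp [h0, h1, h2, pvBlockA, PySem.Str.toList_join, cjoin_nil_sep, hS2,
      pvLineB_0, pvLineB_1, pvLineB_2, toList_empty_str, toList_nl, toList_nlnl,
      PySem.Chars.join_cons_cons, PySem.Chars.join_singleton,
      cjoin_flat_imp, cjoin_flat_from, cflatMap_imp, cflatMap_from, cjoin_flat', Function.comp]
  -- T F T: only third_party
  · rw [List.isEmpty_iff] at h0 h2
    obtain ⟨m1, t1, hS1⟩ := sorted_cons_of_not_isEmpty h1
    simp only [h0, h2, sorted_nil_str, List.map_nil, List.nil_append, List.append_nil,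
      List.isEmpty_nil, if_true]
    rw [hS1, pvEmit_block_nil t1 1 none m1]
    rw [← String.toList_inj]
    simp [h0, h1, h2, pvBlockA, PySem.Str.toList_join, cjoin_nil_sep, hS1,
      pvLineB_0, pvLineB_1, pvLineB_2, toList_empty_str, toList_nl, toList_nlnl,
      PySem.Chars.join_cons_cons, PySem.Chars.join_singleton,
      cjoin_flat_imp, cjoin_flat_from, cflatMap_imp, cflatMap_from, cjoin_flat', Function.comp]
  -- T F F: third_party then local
  · rw [List.isEmpty_iff] at h0
    obtain ⟨m1, t1, hS1⟩ := sorted_cons_of_not_isEmpty h1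
    obtain ⟨m2, t2, hS2⟩ := sorted_cons_of_not_isEmpty h2
    simp only [h0, sorted_nil_str, List.map_nil, List.nil_append, List.isEmpty_nil, if_true,
      List.foldl_append]
    rw [hS1, hS2, pvEmit_block_nil t1 1 none m1]
    rw [pvEmit_block_ne t2 2
      (pvLineB 1 m1 :: List.flatMap (fun m => ["\n", pvLineB 1 m]) t1) (some 1)
      (by simp) (by decide) m2]
    rw [← String.toList_inj]
    simp [h0, h1, h2, pvBlockA, PySem.Str.toList_join, cjoin_nil_sep, hS1, hS2,
      pvLineB_0, pvLineB_1, pvLineB_2, toList_empty_str, toList_nl, toList_nlnl,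
      PySem.Chars.join_cons_cons, PySem.Chars.join_singleton,
      cjoin_flat_imp, cjoin_flat_from, cflatMap_imp, cflatMap_from, cjoin_flat', Function.comp]
  -- F T T: only standard_library
  · rw [List.isEmpty_iff] at h1 h2
    obtain ⟨m0, t0, hS0⟩ := sorted_cons_of_not_isEmpty h0
    simp only [h1, h2, sorted_nil_str, List.map_nil, List.append_nil]
    rw [hS0, pvEmit_block_nil t0 0 none m0]
    rw [← String.toList_inj]
    simp [h0, h1, h2, pvBlockA, PySem.Str.toList_join, cjoin_nil_sep, hS0,
      pvLineB_0, pvLineB_1, pvLineB_2, toList_empty_str, toList_nl, toList_nlnl,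
      PySem.Chars.join_cons_cons, PySem.Chars.join_singleton,
      cjoin_flat_imp, cjoin_flat_from, cflatMap_imp, cflatMap_from, cjoin_flat', Function.comp]
  -- F T F: standard_library then local
  · rw [List.isEmpty_iff] at h1
    obtain ⟨m0, t0, hS0⟩ := sorted_cons_of_not_isEmpty h0
    obtain ⟨m2, t2, hS2⟩ := sorted_cons_of_not_isEmpty h2
    simp only [h1, sorted_nil_str, List.map_nil, List.append_nil, List.nil_append,
      List.foldl_append]
    rw [hS0, hS2, pvEmit_block_nil t0 0 none m0]
    rw [pvEmit_block_ne t2 2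
      (pvLineB 0 m0 :: List.flatMap (fun m => ["\n", pvLineB 0 m]) t0) (some 0)
      (by simp) (by decide) m2]
    rw [← String.toList_inj]
    simp [h0, h1, h2, pvBlockA, PySem.Str.toList_join, cjoin_nil_sep, hS0, hS2,
      pvLineB_0, pvLineB_1, pvLineB_2, toList_empty_str, toList_nl, toList_nlnl,
      PySem.Chars.join_cons_cons, PySem.Chars.join_singleton,
      cjoin_flat_imp, cjoin_flat_from, cflatMap_imp, cflatMap_from, cjoin_flat', Function.comp]
  -- F F T: standard_library then third_party
  · rw [List.isEmpty_iff] at h2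
    obtain ⟨m0, t0, hS0⟩ := sorted_cons_of_not_isEmpty h0
    obtain ⟨m1, t1, hS1⟩ := sorted_cons_of_not_isEmpty h1
    simp only [h2, sorted_nil_str, List.map_nil, List.append_nil, List.foldl_append]
    rw [hS0, hS1, pvEmit_block_nil t0 0 none m0]
    rw [pvEmit_block_ne t1 1
      (pvLineB 0 m0 :: List.flatMap (fun m => ["\n", pvLineB 0 m]) t0) (some 0)
      (by simp) (by decide) m1]
    rw [← String.toList_inj]
    simp [h0, h1, h2, pvBlockA, PySem.Str.toList_join, cjoin_nil_sep, hS0, hS1,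
      pvLineB_0, pvLineB_1, pvLineB_2, toList_empty_str, toList_nl, toList_nlnl,
      PySem.Chars.join_cons_cons, PySem.Chars.join_singleton,
      cjoin_flat_imp, cjoin_flat_from, cflatMap_imp, cflatMap_from, cjoin_flat', Function.comp]
  -- F F F: all three
  · obtain ⟨m0, t0, hS0⟩ := sorted_cons_of_not_isEmpty h0
    obtain ⟨m1, t1, hS1⟩ := sorted_cons_of_not_isEmpty h1
    obtain ⟨m2, t2, hS2⟩ := sorted_cons_of_not_isEmpty h2
    rw [hS0, hS1, hS2]
    simp only [h0, h1, h2, if_neg, Bool.not_eq_true, List.foldl_append]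
    rw [pvEmit_block_nil t0 0 none m0]
    rw [pvEmit_block_ne t1 1
      (pvLineB 0 m0 :: List.flatMap (fun m => ["\n", pvLineB 0 m]) t0) (some 0)
      (by simp) (by decide) m1]
    rw [pvEmit_block_ne t2 2
      ((pvLineB 0 m0 :: List.flatMap (fun m => ["\n", pvLineB 0 m]) t0)
        ++ "\n\n" :: pvLineB 1 m1 :: List.flatMap (fun m => ["\n", pvLineB 1 m]) t1) (some 1)
      (by simp) (by decide) m2]
    rw [← String.toList_inj]
    simp [h0, h1, h2, pvBlockA, PySem.Str.toList_join, cjoin_nil_sep, hS0, hS1, hS2,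
      pvLineB_0, pvLineB_1, pvLineB_2, toList_empty_str, toList_nl, toList_nlnl,
      PySem.Chars.join_cons_cons, PySem.Chars.join_singleton,
      cjoin_flat_imp, cjoin_flat_from, cflatMap_imp, cflatMap_from, cjoin_flat', Function.comp]

-- ===== VERDICT (by name: the statement is the Claim_ definition above) =====
theorem generate_import_section_spec : Claim_equal_generate_import_section := by
  intro imports standard_library third_party local_ _
  unfold Spec_generate_import_section
  exact main_eq imports standard_library third_party local_
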